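-- pv_equiv track=rewrite | github.com/DwayneBurr/discord_challanges | Largest_num/tobi_largest_num.py | longes
-- ===== SOURCE A (Python) =====
-- def longes(l:list) -> list:
--     list1 = sorted([i for i in l])[::-1]
--     packets = []
--     for i in range(9,-1,-1):
--         for j in list1:
--             if str(i) in str(j)[0]:
--                 packets.append(j)
--     return "".join([str(i) for i in packets])
-- ===== SOURCE B (Python) =====
-- def longes(l: list) -> list:
--     # one descending sort, one pass building leading-digit buckets, then keyed lookups 9..0
--     buckets = {}
--     for j in sorted(l, reverse=True):
--         buckets.setdefault(str(j)[0], []).append(j)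
--     return "".join(str(j) for d in "9876543210" for j in buckets.get(d, []))
-- ===== Notes on version B (the rewrite author's own statement) =====
-- stated objective: faster
-- what changed: A rescans the whole sorted list once per digit (10 passes with a substring test and str() conversions on each element); B sorts descending once, builds a dict of leading-digit buckets in a single pass, then concatenates the buckets for '9'..'0' by keyed lookup.
import Mathlib
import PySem

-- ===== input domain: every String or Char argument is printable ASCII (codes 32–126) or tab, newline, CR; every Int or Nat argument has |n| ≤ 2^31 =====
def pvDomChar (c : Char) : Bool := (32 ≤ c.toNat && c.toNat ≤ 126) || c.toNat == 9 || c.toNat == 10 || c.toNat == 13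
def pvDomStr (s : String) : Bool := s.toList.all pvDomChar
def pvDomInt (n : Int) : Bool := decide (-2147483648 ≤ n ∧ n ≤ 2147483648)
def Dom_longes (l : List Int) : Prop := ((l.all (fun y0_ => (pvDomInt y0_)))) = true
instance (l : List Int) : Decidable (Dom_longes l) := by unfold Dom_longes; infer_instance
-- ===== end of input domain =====

-- B replaces A's ten full scans of the sorted list with one bucket-building pass plus keyed lookups (simpler index-then-query structure).

-- ===== PORT A =====
-- 'str(i) in str(j)[0]': str(j) is never empty, so the IndexError branch (none) is unreachable
def pvCondA (i j : Int) : Bool :=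
  match PySem.List.pyGet? (PySem.Int.toChars j) 0 with
  | none => false
  | some c => PySem.Chars.isIn (PySem.Int.toChars i) [c]

def longes (l : List Int) : String :=
  -- sorted([i for i in l])[::-1]   (step -1 ≠ 0, so slice? is always some)
  let list1 := (PySem.List.slice? (PySem.List.sorted (l.map (fun i => i)) (fun x => x) false) none none (-1)).getD []
  let packets := (PySem.List.pyRange 9 (-1) (-1)).foldl
    (fun packets i => list1.foldl
      (fun packets j => if pvCondA i j then packets ++ [j] else packets) packets) ([] : List Int)
  PySem.Str.join "" (packets.map (fun i => PySem.Int.toStr i))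

-- ===== PORT B =====
-- str(j)[0]; str(j) is never empty, so the default is unreachable
def pvLead (j : Int) : Char := (PySem.Int.toChars j).headD ' '

def longes_alt (l : List Int) : String :=
  let buckets := (PySem.List.sorted l (fun x => x) true).foldl
    (fun d j => d.modify (pvLead j) ([] : List Int) (fun b => b ++ [j])) PySem.Dict.empty
  PySem.Str.join "" (("9876543210".toList).flatMap (fun d => (buckets.getD d []).map (fun j => PySem.Int.toStr j)))

-- ===== PRECONDITION & SPEC =====
def Spec_longes (l : List Int) (out : String) : Prop := out = longes_alt l
instance (l : List Int) (out : String) : Decidable (Spec_longes l out) := by unfold Spec_longes; infer_instance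

-- ===== CLAIM (what is proved, stated in full; the proofs are below) =====
def Claim_equal_longes : Prop := ∀ (l : List Int), Dom_longes l → Spec_longes l (longes l)

-- ===== LEMMAS AND PROOFS =====
theorem pvToDigitsCore_len_le (fuel n : Nat) (ds : List Char) :
    ds.length ≤ (Nat.toDigitsCore 10 fuel n ds).length := by
  induction fuel generalizing n ds with
  | zero => simp [Nat.toDigitsCore]
  | succ f ih =>
    simp only [Nat.toDigitsCore]
    split
    · simp
    · exact le_trans (by simp) (ih _ _)

theorem pvToChars_ne_nil (j : Int) : PySem.Int.toChars j ≠ [] := by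
  unfold PySem.Int.toChars
  split
  · simp
  · show Nat.toDigits 10 _ ≠ []
    unfold Nat.toDigits
    simp only [Nat.toDigitsCore]
    split
    · simp
    · apply List.ne_nil_of_length_pos
      calc 0 < ([Nat.digitChar (j.toNat % 10)]).length := by simp
        _ ≤ _ := pvToDigitsCore_len_le _ _ _

theorem pvLead_some (j : Int) :
    PySem.List.pyGet? (PySem.Int.toChars j) 0 = some (pvLead j) := by
  cases hc : PySem.Int.toChars j with
  | nil => exact absurd hc (pvToChars_ne_nil j)
  | cons a t => simp [pvLead, hc]

theorem pvIsIn_singleton (a b : Char) : PySem.Chars.isIn [a] [b] = (b == a) := by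
  by_cases h : b = a
  · subst h
    simp [PySem.Chars.isIn_iff_infix]
  · have hn : ¬ ([a] <:+: [b]) := by
      intro hinf
      have := hinf.sublist.subset (by simp : a ∈ [a])
      simp at this
      exact h this.symm
    rw [(PySem.Chars.isIn_eq_false_iff _ _).mpr hn]
    simp [h]

theorem pvCondA_eval (i : Int) (c : Char) (h : PySem.Int.toChars i = [c]) (j : Int) :
    pvCondA i j = (pvLead j == c) := by
  unfold pvCondA
  rw [pvLead_some, h]
  exact pvIsIn_singleton c (pvLead j)

-- sorted(l)[::-1] is exactly sorted(l, reverse=True) (identity key: ties are equal elements)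
theorem pvDesc_eq (l : List Int) :
    (PySem.List.sorted (l.map (fun i => i)) (fun x => x) false).reverse
      = PySem.List.sorted l (fun x => x) true := by
  have h : PySem.List.sorted (l.map (fun i => i)) (fun x => x) false
      = (PySem.List.sorted l (fun x => x) true).reverse := by
    apply PySem.List.eq_of_perm_of_pairwise_le_of_injective (fun x => x) (fun _ _ h => h)
    · exact ((PySem.List.sorted_perm _ _ _).trans (by simp)).trans
        (((PySem.List.sorted_perm l (fun x => x) true).symm).trans
          (List.reverse_perm _).symm)
    · exact PySem.List.sorted_pairwise _ _
    · exact List.pairwise_reverse.mpr (PySem.List.sorted_pairwise_rev _ _)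
  rw [h, List.reverse_reverse]

-- the bucket for key c holds exactly the elements with leading char c, in traversal order
theorem pvBucket_getD (S : List Int) (c : Char) :
    ((S.foldl (fun d j => d.modify (pvLead j) ([] : List Int) (fun b => b ++ [j]))
        PySem.Dict.empty).getD c [])
      = S.filter (fun j => pvLead j == c) := by
  have h := PySem.Dict.getD_foldl_modify_append
    (S.map (fun j => (pvLead j, j))) (PySem.Dict.empty) c
  rw [List.foldl_map] at h
  simpa [List.filter_map, Function.comp_def, List.map_map] using h

-- ===== VERDICT (by name: the statement is the Claim_ definition above) =====
theorem longes_spec : Claim_equal_longes := by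
  intro l _
  unfold Spec_longes longes longes_alt
  simp only [PySem.List.slice?_none_none_neg_one, Option.getD_some, pvDesc_eq]
  simp only [PySem.List.foldl_append_if_eq_filter, PySem.List.foldl_append_eq_flatMap,
    List.nil_append, pvBucket_getD]
  rw [show PySem.List.pyRange 9 (-1) (-1) = [9,8,7,6,5,4,3,2,1,0] from by decide,
    show ("9876543210".toList) = ['9','8','7','6','5','4','3','2','1','0'] from rfl]
  have e : ∀ (i : Int) (c : Char), PySem.Int.toChars i = [c] →
      (PySem.List.sorted l (fun x => x) true).filter (pvCondA i)
        = (PySem.List.sorted l (fun x => x) true).filter (fun j => pvLead j == c) :=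
    fun i c h => List.filter_congr (fun j _ => pvCondA_eval i c h j)
  simp only [List.flatMap_cons, List.flatMap_nil, List.append_nil, List.map_append]
  rw [e 9 '9' (by decide), e 8 '8' (by decide), e 7 '7' (by decide), e 6 '6' (by decide),
    e 5 '5' (by decide), e 4 '4' (by decide), e 3 '3' (by decide), e 2 '2' (by decide),
    e 1 '1' (by decide), e 0 '0' (by decide)]
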